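-- pv_equiv track=rewrite | github.com/ishajoshi251/Leetcode-Practice | 1732-find-the-highest-altitude/1732-find-the-highest-altitude.py | largestAltitude
-- ===== SOURCE A (Python) =====
-- from typing import List
--
-- def largestAltitude(gain: List[int]) -> int:
--     l = []
--     l.append(0)
--     sum1 = 0
--     for i in gain:
--         sum1 = sum1 + i
--         l.append(sum1)
--     return max(l)
-- ===== SOURCE B (Python) =====
-- from typing import List
--
-- def largestAltitude(gain: List[int]) -> int:
--     # best = highest prefix sum of the suffix processed so far (>= 0 since the empty
--     # prefix counts): for [g] + rest it is max(0, g + best(rest)).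
--     best = 0
--     for g in reversed(gain):
--         best = max(0, g + best)
--     return best
-- ===== Notes on version B (the rewrite author's own statement) =====
-- stated objective: alternative
-- what changed: B never computes any prefix sum: it walks the list right-to-left with the suffix recurrence best = max(0, g + best), whereas A accumulates all prefix sums left-to-right into a list and takes its max.
import Mathlib
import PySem

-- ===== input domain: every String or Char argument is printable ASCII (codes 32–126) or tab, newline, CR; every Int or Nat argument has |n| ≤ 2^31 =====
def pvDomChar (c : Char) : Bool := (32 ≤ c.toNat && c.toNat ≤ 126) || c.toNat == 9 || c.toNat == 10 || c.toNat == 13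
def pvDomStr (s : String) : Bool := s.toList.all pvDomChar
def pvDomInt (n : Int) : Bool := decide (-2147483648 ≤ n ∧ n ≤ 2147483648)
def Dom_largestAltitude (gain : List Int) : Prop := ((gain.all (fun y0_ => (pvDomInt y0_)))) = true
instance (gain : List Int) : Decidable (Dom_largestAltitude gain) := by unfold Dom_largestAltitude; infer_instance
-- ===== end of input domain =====

-- B replaces A's prefix-sum list + trailing max scan by a right-to-left pass with the
-- suffix recurrence best = max(0, g + best); no prefix sum is ever formed (objective: alternative).

-- ===== PORT A =====
-- l = [0]; sum1 = 0; for i in gain: sum1 += i; l.append(sum1); return max(l)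
def largestAltitude (gain : List Int) : Int :=
  let st := gain.foldl (fun (st : List Int × Int) i =>
    (st.1 ++ [st.2 + i], st.2 + i)) ([0], 0)
  -- max(l): l always contains 0, so max never raises; the none branch is unreachable
  match PySem.List.max? st.1 (fun y => y) with
  | some m => m
  | none => 0

-- ===== PORT B =====
-- best = 0; for g in reversed(gain): best = max(0, g + best); return best
def largestAltitude_alt (gain : List Int) : Int :=
  gain.reverse.foldl (fun best g => max 0 (g + best)) 0

-- ===== PRECONDITION & SPEC =====
def Spec_largestAltitude (gain : List Int) (out : Int) : Prop := out = largestAltitude_alt gain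
instance (gain : List Int) (out : Int) : Decidable (Spec_largestAltitude gain out) := by unfold Spec_largestAltitude; infer_instance

-- ===== CLAIM (what is proved, stated in full; the proofs are below) =====
def Claim_equal_largestAltitude : Prop := ∀ (gain : List Int), Dom_largestAltitude gain → Spec_largestAltitude gain (largestAltitude gain)

-- ===== LEMMAS AND PROOFS =====

-- B's loop over reversed(gain) is the right fold of the suffix recurrence.
theorem pv_alt_foldr (gain : List Int) :
    largestAltitude_alt gain = gain.foldr (fun g best => max 0 (g + best)) 0 := by
  unfold largestAltitude_alt
  rw [List.foldl_reverse]

theorem pv_F_nonneg (gain : List Int) :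
    0 ≤ gain.foldr (fun g best => max 0 (g + best)) 0 := by
  induction gain with
  | nil => simp
  | cons g rest ih => simp only [List.foldr_cons]; omega

-- Invariant linking A's running state (list h::t of sums so far, current sum s, s already
-- bounded by the list's max) to B's suffix recurrence on the remaining gains.
theorem pv_main (gain : List Int) : ∀ (h : Int) (t : List Int) (s : Int), s ≤ t.foldl max h →
    (match PySem.List.max?
        ((gain.foldl (fun (st : List Int × Int) i => (st.1 ++ [st.2 + i], st.2 + i)) (h :: t, s)).1)
        (fun y => y) with
      | some m => m
      | none => 0)
    = max (t.foldl max h) (s + gain.foldr (fun g best => max 0 (g + best)) 0) := by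
  induction gain with
  | nil =>
    intro h t s hs
    simp only [List.foldl_nil, List.foldr_nil, PySem.List.max?_id_cons]
    omega
  | cons i rest ih =>
    intro h t s hs
    have hF := pv_F_nonneg rest
    have step := ih h (t ++ [s + i]) (s + i)
      (by simp only [List.foldl_append, List.foldl_cons, List.foldl_nil]; omega)
    simp only [List.foldl_cons, List.cons_append] at step ⊢
    rw [step]
    simp only [List.foldl_append, List.foldl_cons, List.foldl_nil, List.foldr_cons]
    omega

-- ===== VERDICT (by name: the statement is the Claim_ definition above) =====
theorem largestAltitude_spec : Claim_equal_largestAltitude := by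
  intro gain _
  unfold Spec_largestAltitude largestAltitude
  rw [pv_alt_foldr]
  have := pv_main gain 0 [] 0 (le_refl 0)
  simpa [max_eq_right (pv_F_nonneg gain)] using this
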